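-- pv_equiv track=rewrite | github.com/JasperNL/scip-symretope | analyze/checkutil/evalutil.py | remove_suffices
-- ===== SOURCE A (Python) =====
-- suffixes = [".gz", ".mps", ".cip"]
--
-- def remove_suffices(s):
--     has_suff = True
--     while has_suff:
--         has_suff = False
--         for suff in suffixes:
--             if s[-len(suff):] == suff:
--                 s = s[:-len(suff)]
--                 has_suff = True
--                 continue
--     return s
-- ===== SOURCE B (Python) =====
-- def remove_suffices(s):
--     parts = s.split('.')
--     while len(parts) > 1 and parts[-1] in ("gz", "mps", "cip"):
--         parts.pop()
--     return '.'.join(parts)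
-- ===== Notes on version B (the rewrite author's own statement) =====
-- stated objective: alternative
-- what changed: B splits the string on '.' once into segments, pops trailing segments that are 'gz'/'mps'/'cip' while more than one segment remains, and rejoins, instead of A's repeated passes that compare and re-slice the string tail for each suffix.
import Mathlib
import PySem

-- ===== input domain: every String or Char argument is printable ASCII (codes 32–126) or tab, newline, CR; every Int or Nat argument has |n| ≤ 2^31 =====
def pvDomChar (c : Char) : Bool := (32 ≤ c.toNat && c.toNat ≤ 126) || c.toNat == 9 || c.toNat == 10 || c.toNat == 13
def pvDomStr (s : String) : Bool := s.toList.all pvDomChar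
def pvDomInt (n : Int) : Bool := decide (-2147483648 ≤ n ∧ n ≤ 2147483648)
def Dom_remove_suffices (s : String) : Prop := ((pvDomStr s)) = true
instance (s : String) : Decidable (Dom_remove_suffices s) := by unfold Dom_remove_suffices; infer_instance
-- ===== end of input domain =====

-- B splits the string on '.' once and pops trailing 'gz'/'mps'/'cip' segments, instead of A's
-- repeated compare-and-reslice passes; equivalence of the return values is proved on Dom.

-- ===== PORT A =====
-- suffixes = [".gz", ".mps", ".cip"]
def pvSfx : List (List Char) := [".gz".toList, ".mps".toList, ".cip".toList]

-- body of the for-loop over `suffixes`: state = (s, has_suff)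
def pvStepA (p : List Char × Bool) (suff : List Char) : List Char × Bool :=
  if PySem.Chars.slice p.1 (some (-(suff.length : Int))) none = suff then
    (PySem.Chars.slice p.1 none (some (-(suff.length : Int))), true)
  else p

-- termination helper for the while-loop: one pass never grows the string, and if it
-- set has_suff it strictly shrank it
theorem pvFold_len (L : List (List Char)) (hL : ∀ t ∈ L, 0 < t.length) (p : List Char × Bool) :
    (L.foldl pvStepA p).1.length ≤ p.1.length ∧
      ((L.foldl pvStepA p).2 = p.2 ∨ (L.foldl pvStepA p).1.length < p.1.length) := by
  induction L generalizing p with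
  | nil => exact ⟨le_rfl, Or.inl rfl⟩
  | cons a L ih =>
    simp only [List.foldl_cons]
    rcases ih (fun t ht => hL t (List.mem_cons_of_mem a ht)) (pvStepA p a) with ⟨h1, h2⟩
    have hs : (pvStepA p a).1.length ≤ p.1.length ∧
        ((pvStepA p a).2 = p.2 ∨ (pvStepA p a).1.length < p.1.length) := by
      have hk : 0 < a.length := hL a List.mem_cons_self
      unfold pvStepA
      split_ifs with hm
      · rw [PySem.Chars.slice_eq_listSlice, PySem.List.slice_from_neg_natCast _ _ hk] at hm
        have hlen := congrArg List.length hm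
        simp only [List.length_drop] at hlen
        rw [PySem.Chars.slice_eq_listSlice, PySem.List.slice_to_neg_natCast _ _ hk]
        simp only [List.length_take]
        exact ⟨by omega, Or.inr (by omega)⟩
      · exact ⟨le_rfl, Or.inl rfl⟩
    refine ⟨h1.trans hs.1, ?_⟩
    rcases h2 with h2 | h2
    · rcases hs.2 with h3 | h3
      · exact Or.inl (h2.trans h3)
      · exact Or.inr (lt_of_le_of_lt h1 h3)
    · exact Or.inr (lt_of_lt_of_le h2 hs.1)

-- while has_suff: has_suff = False; for suff in suffixes: …
def pvLoopA (s : List Char) : List Char :=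
  if h : (pvSfx.foldl pvStepA (s, false)).2 = true then
    pvLoopA (pvSfx.foldl pvStepA (s, false)).1
  else
    (pvSfx.foldl pvStepA (s, false)).1
termination_by s.length
decreasing_by
  have := pvFold_len pvSfx (by decide) (s, false)
  rcases this.2 with h2 | h2
  · rw [h] at h2; cases h2
  · exact h2

def remove_suffices (s : String) : String := String.ofList (pvLoopA s.toList)

-- ===== PORT B =====
def pvTails : List (List Char) := ["gz".toList, "mps".toList, "cip".toList]

-- while len(parts) > 1 and parts[-1] in ("gz", "mps", "cip"): parts.pop()
def pvPopB (parts : List (List Char)) : List (List Char) :=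
  if 1 < parts.length ∧ (PySem.List.pyGet? parts (-1)).getD [] ∈ pvTails then
    pvPopB parts.dropLast
  else parts
termination_by parts.length
decreasing_by
  rename_i h
  simp only [List.length_dropLast]
  omega

def remove_suffices_alt (s : String) : String :=
  String.ofList (PySem.Chars.join ['.'] (pvPopB (PySem.Chars.splitOn s.toList ['.'])))

-- ===== PRECONDITION & SPEC =====
def Spec_remove_suffices (s : String) (out : String) : Prop := out = remove_suffices_alt s
instance (s : String) (out : String) : Decidable (Spec_remove_suffices s out) := by unfold Spec_remove_suffices; infer_instance

-- ===== CLAIM (what is proved, stated in full; the proofs are below) =====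
def Claim_equal_remove_suffices : Prop := ∀ (s : String), Dom_remove_suffices s → Spec_remove_suffices s (remove_suffices s)

-- ===== LEMMAS AND PROOFS =====

-- clean characterization of splitting on '.'
def pvSplitD (l : List Char) : List (List Char) :=
  match l with
  | [] => [[]]
  | c :: r => if c = '.' then [] :: pvSplitD r else (pvSplitD r).modifyHead (c :: ·)

theorem pvSplitD_ne_nil (l : List Char) : pvSplitD l ≠ [] := by
  induction l with
  | nil => simp [pvSplitD]
  | cons c r ih =>
    simp only [pvSplitD]
    split_ifs
    · simp
    · cases h : pvSplitD r with
      | nil => exact absurd h ih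
      | cons a t => simp [List.modifyHead]

-- the fuel-indexed splitter of PySem computes pvSplitD
theorem pvGo_spec : ∀ (fuel : Nat) (l cur : List Char) (acc : List (List Char)),
    l.length < fuel →
    PySem.Chars.splitOn.go ['.'] fuel l cur acc
      = acc.reverse ++ (pvSplitD l).modifyHead (cur.reverse ++ ·) := by
  intro fuel
  induction fuel with
  | zero => intro l cur acc h; omega
  | succ n ih =>
    intro l cur acc h
    cases l with
    | nil =>
      simp [PySem.Chars.splitOn.go, pvSplitD, List.modifyHead]
    | cons c r =>
      rw [PySem.Chars.splitOn.go]
      by_cases hc : c = '.'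
      · subst hc
        have hpre : List.isPrefixOf ['.'] ('.' :: r) = true := by simp [List.isPrefixOf]
        rw [if_pos hpre]
        have hdrop : List.drop ['.'].length ('.' :: r) = r := rfl
        rw [hdrop]
        simp only [List.length_cons] at h
        rw [ih r [] (cur.reverse :: acc) (by omega)]
        obtain ⟨h0, t0, hs⟩ : ∃ h0 t0, pvSplitD r = h0 :: t0 := by
          cases hh : pvSplitD r with
          | nil => exact absurd hh (pvSplitD_ne_nil r)
          | cons a t => exact ⟨a, t, rfl⟩
        simp [pvSplitD, hs, List.modifyHead]
      · have hpre : List.isPrefixOf ['.'] (c :: r) = false := by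
          simp [List.isPrefixOf]
          exact fun hh => hc hh.symm
        rw [if_neg (by simp [hpre])]
        simp only [List.length_cons] at h
        rw [ih r (c :: cur) acc (by omega)]
        obtain ⟨h0, t0, hs⟩ : ∃ h0 t0, pvSplitD r = h0 :: t0 := by
          cases hh : pvSplitD r with
          | nil => exact absurd hh (pvSplitD_ne_nil r)
          | cons a t => exact ⟨a, t, rfl⟩
        simp [pvSplitD, hc, hs, List.modifyHead]

theorem pvSplitOn_eq (s : List Char) : PySem.Chars.splitOn s ['.'] = pvSplitD s := by
  unfold PySem.Chars.splitOn
  rw [pvGo_spec (s.length + 1) s [] [] (by omega)]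
  obtain ⟨h0, t0, hs⟩ : ∃ h0 t0, pvSplitD s = h0 :: t0 := by
    cases hh : pvSplitD s with
    | nil => exact absurd hh (pvSplitD_ne_nil s)
    | cons a t => exact ⟨a, t, rfl⟩
  simp [hs, List.modifyHead]

-- joining with '.' undoes pvSplitD
theorem pvIntercalate_cons_head (a h : List Char) (t : List (List Char)) :
    List.intercalate ['.'] ((a ++ h) :: t) = a ++ List.intercalate ['.'] (h :: t) := by
  cases t with
  | nil => simp [List.intercalate]
  | cons b t => simp [List.intercalate, List.intersperse]

theorem pvJoin_splitD (s : List Char) : PySem.Chars.join ['.'] (pvSplitD s) = s := by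
  show List.intercalate ['.'] (pvSplitD s) = s
  induction s with
  | nil => simp [pvSplitD, List.intercalate]
  | cons c r ih =>
    simp only [pvSplitD]
    split_ifs with hc
    · subst hc
      obtain ⟨h0, t0, hs⟩ : ∃ h0 t0, pvSplitD r = h0 :: t0 := by
        cases hh : pvSplitD r with
        | nil => exact absurd hh (pvSplitD_ne_nil r)
        | cons a t => exact ⟨a, t, rfl⟩
      rw [hs] at ih ⊢
      simp [List.intercalate, List.intersperse] at ih ⊢
      exact ih
    · obtain ⟨h0, t0, hs⟩ : ∃ h0 t0, pvSplitD r = h0 :: t0 := by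
        cases hh : pvSplitD r with
        | nil => exact absurd hh (pvSplitD_ne_nil r)
        | cons a t => exact ⟨a, t, rfl⟩
      rw [hs] at ih ⊢
      have := pvIntercalate_cons_head [c] h0 t0
      simp only [List.modifyHead, List.singleton_append] at this ⊢
      rw [this, ih]

theorem pvIntercalate_append_singleton (ps : List (List Char)) (t : List Char) (h : ps ≠ []) :
    List.intercalate ['.'] (ps ++ [t]) = List.intercalate ['.'] ps ++ '.' :: t := by
  induction ps with
  | nil => simp at h
  | cons a ps ih =>
    cases ps with
    | nil => simp [List.intercalate, List.intersperse]
    | cons b ps =>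
      have := ih (by simp)
      simp [List.intercalate, List.intersperse] at this ⊢
      simp [this]

theorem pvSplitD_no_dot (b : List Char) (h : '.' ∉ b) : pvSplitD b = [b] := by
  induction b with
  | nil => rfl
  | cons c r ih =>
    simp only [List.mem_cons, not_or] at h
    have hc : ¬ c = '.' := fun hh => h.1 hh.symm
    simp [pvSplitD, hc, ih h.2, List.modifyHead]

theorem pvSplitD_append_dot (u t : List Char) (h : '.' ∉ t) :
    pvSplitD (u ++ '.' :: t) = pvSplitD u ++ [t] := by
  induction u with
  | nil => simp [pvSplitD, pvSplitD_no_dot t h]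
  | cons c u ih =>
    simp only [List.cons_append, pvSplitD]
    split_ifs with hc
    · simp [ih]
    · rw [ih]
      obtain ⟨h0, t0, hs⟩ : ∃ h0 t0, pvSplitD u = h0 :: t0 := by
        cases hh : pvSplitD u with
        | nil => exact absurd hh (pvSplitD_ne_nil u)
        | cons a t => exact ⟨a, t, rfl⟩
      simp [hs, List.modifyHead]

-- value computed by B, as a function of the char list
def pvAlt (s : List Char) : List Char :=
  PySem.Chars.join ['.'] (pvPopB (pvSplitD s))

theorem pvTails_no_dot (t : List Char) (h : t ∈ pvTails) : '.' ∉ t := by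
  fin_cases h <;> decide

theorem pvPyGet_last (ps : List (List Char)) (t : List Char) :
    PySem.List.pyGet? (ps ++ [t]) (-1) = some t := by
  simp [PySem.List.pyGet?, PySem.List.pyIdx?]

-- stripping one dotted suffix commutes with B's value
theorem pvStrip (u t : List Char) (ht : t ∈ pvTails) :
    pvAlt (u ++ '.' :: t) = pvAlt u := by
  unfold pvAlt
  rw [pvSplitD_append_dot u t (pvTails_no_dot t ht)]
  rw [pvPopB]
  have hne := pvSplitD_ne_nil u
  have hlen : 0 < (pvSplitD u).length := List.length_pos_iff.mpr hne
  rw [if_pos]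
  · rw [List.dropLast_concat]
  · constructor
    · simp; omega
    · rw [pvPyGet_last]; simpa using ht

-- if no suffix matches s, B returns s unchanged
theorem pvNoPop (s : List Char)
    (hnm : ∀ suff ∈ pvSfx, PySem.Chars.slice s (some (-(suff.length : Int))) none ≠ suff) :
    pvAlt s = s := by
  unfold pvAlt
  rw [pvPopB]
  split_ifs with hg
  · exfalso
    obtain ⟨hlen, hmem⟩ := hg
    -- decompose the split into init ++ [last]
    obtain ⟨ps, t, hps⟩ : ∃ ps t, pvSplitD s = ps ++ [t] ∧ ps ≠ [] := by
      refine ⟨(pvSplitD s).dropLast, (pvSplitD s).getLast (pvSplitD_ne_nil s),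
        (List.dropLast_concat_getLast (pvSplitD_ne_nil s)).symm, ?_⟩
      intro hnil
      have hld : (pvSplitD s).dropLast.length = (pvSplitD s).length - 1 :=
        List.length_dropLast
      rw [hnil] at hld
      simp at hld
      omega
    obtain ⟨hps, hpsne⟩ := hps
    rw [hps, pvPyGet_last] at hmem
    simp only [Option.getD_some] at hmem
    -- s ends with '.' :: t
    have hs : s = List.intercalate ['.'] ps ++ '.' :: t := by
      have := pvJoin_splitD s
      rw [hps] at this
      rw [← this]
      exact (pvIntercalate_append_singleton ps t hpsne).symm ▸ rfl
    have hsfx : ('.' :: t) ∈ pvSfx := by fin_cases hmem <;> decide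
    apply hnm ('.' :: t) hsfx
    have hk : 0 < ('.' :: t).length := by simp
    rw [PySem.Chars.slice_eq_listSlice, PySem.List.slice_from_neg_natCast _ _ hk]
    rw [hs]
    simp
  · exact pvJoin_splitD s

-- one for-loop step preserves B's value
theorem pvStepA_alt (p : List Char × Bool) (suff : List Char) (h : suff ∈ pvSfx) :
    pvAlt (pvStepA p suff).1 = pvAlt p.1 := by
  unfold pvStepA
  split_ifs with hm
  · obtain ⟨t, ht, hsuff⟩ : ∃ t, t ∈ pvTails ∧ suff = '.' :: t := by
      fin_cases h
      · exact ⟨"gz".toList, by decide, rfl⟩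
      · exact ⟨"mps".toList, by decide, rfl⟩
      · exact ⟨"cip".toList, by decide, rfl⟩
    have hk : 0 < suff.length := by rw [hsuff]; simp
    rw [PySem.Chars.slice_eq_listSlice, PySem.List.slice_from_neg_natCast _ _ hk] at hm
    have hge : suff.length ≤ p.1.length := by
      have := congrArg List.length hm
      simp at this
      omega
    have hdecomp : p.1 = p.1.take (p.1.length - suff.length) ++ '.' :: t := by
      conv_lhs => rw [← List.take_append_drop (p.1.length - suff.length) p.1]
      rw [hm, hsuff]
    have hslice : PySem.Chars.slice p.1 none (some (-(suff.length : Int)))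
        = p.1.take (p.1.length - suff.length) := by
      rw [PySem.Chars.slice_eq_listSlice, PySem.List.slice_to_neg_natCast _ _ hk]
    simp only [hslice]
    conv_rhs => rw [hdecomp]
    exact (pvStrip _ t ht).symm
  · rfl

-- a pass that ends with has_suff = False changed nothing and matched nothing
theorem pvStepA_mono (p : List Char × Bool) (suff : List Char) (h : p.2 = true) :
    (pvStepA p suff).2 = true := by
  unfold pvStepA; split_ifs <;> simp [h]

theorem pvFold_mono (L : List (List Char)) (p : List Char × Bool) (h : p.2 = true) :
    (L.foldl pvStepA p).2 = true := by
  induction L generalizing p with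
  | nil => exact h
  | cons a L ih => exact ih _ (pvStepA_mono p a h)

theorem pvFold_stuck (L : List (List Char)) (p : List Char × Bool)
    (h : (L.foldl pvStepA p).2 = false) :
    L.foldl pvStepA p = p ∧
      ∀ suff ∈ L, PySem.Chars.slice p.1 (some (-(suff.length : Int))) none ≠ suff := by
  induction L generalizing p with
  | nil => exact ⟨rfl, by simp⟩
  | cons a L ih =>
    simp only [List.foldl_cons] at h ⊢
    have hstep : (pvStepA p a).2 = false := by
      by_contra hh
      have := pvFold_mono L (pvStepA p a) (by simpa using hh)
      rw [h] at this; cases this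
    have hnm : PySem.Chars.slice p.1 (some (-(a.length : Int))) none ≠ a := by
      intro hm
      unfold pvStepA at hstep
      rw [if_pos hm] at hstep
      cases hstep
    have hid : pvStepA p a = p := by
      unfold pvStepA; rw [if_neg hnm]
    rw [hid] at h ⊢
    rcases ih p h with ⟨h1, h2⟩
    refine ⟨h1, ?_⟩
    intro suff hsuff
    rcases List.mem_cons.mp hsuff with hs | hs
    · subst hs; exact hnm
    · exact h2 suff hs

-- B's value is invariant through a whole pass
theorem pvFold_alt (s : List Char) :
    pvAlt ((pvSfx.foldl pvStepA (s, false)).1) = pvAlt s := by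
  have h1 : pvSfx.foldl pvStepA (s, false)
      = pvStepA (pvStepA (pvStepA (s, false) ".gz".toList) ".mps".toList) ".cip".toList := by
    simp only [pvSfx, List.foldl_cons, List.foldl_nil]
  rw [h1]
  rw [pvStepA_alt _ ".cip".toList (by decide)]
  rw [pvStepA_alt _ ".mps".toList (by decide)]
  rw [pvStepA_alt _ ".gz".toList (by decide)]

theorem pvLoopA_eq (s : List Char) : pvLoopA s = pvAlt s := by
  induction s using pvLoopA.induct with
  | case1 s h ih =>
    rw [pvLoopA.eq_def, dif_pos h, ih, pvFold_alt]
  | case2 s h =>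
    rw [pvLoopA.eq_def, dif_neg h]
    have hfalse : (pvSfx.foldl pvStepA (s, false)).2 = false := by
      simpa using h
    rcases pvFold_stuck pvSfx (s, false) hfalse with ⟨h1, h2⟩
    rw [h1]
    exact (pvNoPop s h2).symm

-- ===== VERDICT (by name: the statement is the Claim_ definition above) =====
theorem remove_suffices_spec : Claim_equal_remove_suffices := by
  intro s _
  unfold Spec_remove_suffices remove_suffices remove_suffices_alt
  rw [pvSplitOn_eq, pvLoopA_eq]
  rfl
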